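-- pv_equiv track=rewrite | github.com/acm-uga/archive | 2019-02-11/rhyme.py | rhyme_schemes
-- ===== SOURCE A (Python) =====
-- def next_value(rhyme):
--     '''Get the next rhyme scheme.
--
--     Arguments:
--         rhyme (list of non-negative int):
--             The rhyme scheme in list form.
--
--     Returns:
--         The next rhyme scheme in list form. The rhyme scheme will have the same
-- 		number of lines.
--     '''
--     rhyme = rhyme.copy()
--
--     if rhyme == []:
--         return []
--
--     max_val = max(rhyme[:-1]) + 1
--
--     if rhyme[-1] == max_val:
--         rhyme[:-1] = next_value(rhyme[:-1])
--         rhyme[-1] = 0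
--     else:
--         rhyme[-1] = rhyme[-1] + 1
--
--     return rhyme
--
-- def rhyme_schemes(n):
--     '''Generate all possible rhyme schemes for a poem of `n` lines.
--
--     For example, a three line poem could have the rhyme schemes `AAA`, `AAB`,
--     `ABA`, or `ABC`. Each letter corresponds to a unique syllable at the end of
--     each line. Lines marked by the same letter rhyme. The first line is always
--     marked by an `A` and you can't use a new letter unless you have used the
--     previous letter, e.g. you can't use `C` unless you've used `B`.
--
--     We use numbers instead of letters, where 0 represents `A`, 1 represents `B`,
--     etc.
--
--     Arguments:
--         n (non-negative int):
--             The number of lines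
--
--     Yields (list of non-negative int):
--         Yields each rhyme scheme as a list of ints.
--     '''
--     start = [0 for _ in range(n)]  # [0, 0, 0] when n=3
--     stop = [i for i in range(n)]  # [0, 1, 2] when n=3
--
--     val = start.copy()
--     while val < stop:
--         yield val
--         val = next_value(val)
--     yield val
-- ===== SOURCE B (Python) =====
-- def rhyme_schemes(n):
--     '''Generate all rhyme schemes of `n` lines, depth-first, position by position.'''
--     def gen(prefix, maxlabel, remaining):
--         if remaining <= 0:
--             yield list(prefix)
--             return
--         for v in range(maxlabel + 2):
--             prefix.append(v)
--             yield from gen(prefix, max(maxlabel, v), remaining - 1)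
--             prefix.pop()
--     yield from gen([], -1, n)
-- ===== Notes on version B (the rewrite author's own statement) =====
-- stated objective: alternative
-- what changed: Replaced the successor-iteration loop (repeatedly computing the lexicographically next rhyme scheme via the recursive carry function next_value until the stop value is reached) by a recursive depth-first generator that builds each scheme position by position, extending the current prefix with every allowed label up to one above the running maximum.
import Mathlib
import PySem

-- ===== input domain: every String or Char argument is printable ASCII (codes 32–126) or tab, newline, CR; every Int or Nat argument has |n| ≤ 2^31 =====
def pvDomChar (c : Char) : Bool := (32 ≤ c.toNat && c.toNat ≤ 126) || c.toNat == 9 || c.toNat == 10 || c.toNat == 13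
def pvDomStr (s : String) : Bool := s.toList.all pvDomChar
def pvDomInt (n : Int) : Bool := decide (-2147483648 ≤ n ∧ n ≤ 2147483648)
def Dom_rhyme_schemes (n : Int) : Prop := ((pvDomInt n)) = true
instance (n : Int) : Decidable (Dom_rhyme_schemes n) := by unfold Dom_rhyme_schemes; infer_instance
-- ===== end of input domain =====

-- B replaces A's successor-iteration loop (next_value until the stop value) by a recursive
-- depth-first generator extending a prefix position by position: an alternative decomposition.

-- ===== PORT A =====

-- Hand port of Python's `<` on lists of ints (exact: elementwise compare, a strict prefix is smaller).
def pvListLt : List Int → List Int → Bool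
  | _, [] => false
  | [], _ :: _ => true
  | a :: as, b :: bs => if a < b then true else if b < a then false else pvListLt as bs

-- next_value: literal port.  For a singleton list Python's max(rhyme[:-1]) raises ValueError;
-- that call is unreachable from rhyme_schemes, so the port's `.getD 0` default there is irrelevant.
def next_value (rhyme : List Int) : List Int :=
  if rhyme = [] then []
  else
    if PySem.List.pyGet? rhyme (-1) =
        some ((PySem.List.max? (PySem.List.slice rhyme none (some (-1))) (fun y => y)).getD 0 + 1) then
      next_value (PySem.List.slice rhyme none (some (-1))) ++ [0]
    else
      PySem.List.slice rhyme none (some (-1)) ++ [(PySem.List.pyGet? rhyme (-1)).getD 0 + 1]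
termination_by rhyme.length
decreasing_by
  simp only [PySem.List.slice_to_neg_one]
  cases rhyme with
  | nil => simp_all
  | cons x xs => simp

-- the while loop of rhyme_schemes; fuel is a totality guard only, shown sufficient in the proofs
def loopA (stop : List Int) (val : List Int) (fuel : Nat) : List (List Int) :=
  match fuel with
  | 0 => []
  | fuel + 1 => if pvListLt val stop then val :: loopA stop (next_value val) fuel else [val]

def rhyme_schemes (n : Int) : List (List Int) :=
  loopA (PySem.List.pyRange 0 n 1) ((PySem.List.pyRange 0 n 1).map (fun _ => (0 : Int)))
    ((n.toNat + 2) ^ n.toNat)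

-- ===== PORT B =====
def gen_helper (pre : List Int) (maxlabel : Int) (remaining : Int) : List (List Int) :=
  if remaining ≤ 0 then [pre]
  else (PySem.List.pyRange 0 (maxlabel + 2) 1).flatMap
        (fun v => gen_helper (pre ++ [v]) (max maxlabel v) (remaining - 1))
termination_by remaining.toNat
decreasing_by omega

def rhyme_schemes_alt (n : Int) : List (List Int) := gen_helper [] (-1) n

-- ===== PRECONDITION & SPEC =====
def Spec_rhyme_schemes (n : Int) (out : List (List Int)) : Prop := out = rhyme_schemes_alt n
instance (n : Int) (out : List (List Int)) : Decidable (Spec_rhyme_schemes n out) := by unfold Spec_rhyme_schemes; infer_instance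

-- ===== CLAIM (what is proved, stated in full; the proofs are below) =====
def Claim_equal_rhyme_schemes : Prop := ∀ (n : Int), Dom_rhyme_schemes n → Spec_rhyme_schemes n (rhyme_schemes n)

-- ===== LEMMAS AND PROOFS =====

-- the spec enumeration: all restricted-growth sequences of length k continuing running max m, in order
def E : Nat → Int → List (List Int)
  | 0, _ => [[]]
  | k + 1, m => (PySem.List.pyRange 0 (m + 2) 1).flatMap (fun v => (E k (max m v)).map (fun s => v :: s))

def mx (s : List Int) : Int := s.foldl max (-1)

def child (s : List Int) : List (List Int) :=
  (PySem.List.pyRange 0 (mx s + 2) 1).map (fun v => s ++ [v])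

def stopk (k : Nat) : List Int := PySem.List.pyRange 0 k 1

def enum (k : Nat) : List (List Int) := E k (-1)

-- the chain relation along enum k: each element's successor (by next_value) is the next one
def RelC (k : Nat) (a b : List Int) : Prop := next_value a = b ∧ pvListLt a (stopk k) = true

-- B's generator is E, with the prefix mapped on
lemma gen_helper_E : ∀ (k : Nat) (r : Int), r.toNat = k → ∀ (p : List Int) (m : Int),
    gen_helper p m r = (E k m).map (fun s => p ++ s) := by
  intro k
  induction k with
  | zero =>
    intro r hr p m
    rw [gen_helper]
    have : r ≤ 0 := by omega
    simp [this, E]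
  | succ k ih =>
    intro r hr p m
    rw [gen_helper]
    have h1 : ¬ r ≤ 0 := by omega
    simp only [h1, if_false, E, List.map_flatMap]
    simp only [ih (r-1) (by omega)]
    simp [List.map_map, Function.comp_def, List.append_assoc]

-- DFS by first position = extend every sequence of length k at the end
lemma E_fubini : ∀ (k : Nat) (m : Int),
    E (k + 1) m = (E k m).flatMap
      (fun s => (PySem.List.pyRange 0 (s.foldl max m + 2) 1).map (fun v => s ++ [v])) := by
  intro k
  induction k with
  | zero => intro m; simp [E]; rw [List.map_eq_flatMap]
  | succ k ih =>
    intro m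
    conv_lhs => rw [E]
    conv_rhs => rw [E]
    simp only [ih]
    simp [List.map_flatMap, List.flatMap_assoc, List.flatMap_map, List.map_map, Function.comp_def]

lemma enum_succ (k : Nat) : enum (k + 1) = (enum k).flatMap child := by
  simpa [enum, child, mx] using E_fubini k (-1)

lemma length_mem_enum : ∀ (k : Nat) (s : List Int), s ∈ enum k → s.length = k := by
  intro k
  induction k with
  | zero => intro s hs; simp [enum, E] at hs; simp [hs]
  | succ k ih =>
    intro s hs
    rw [enum_succ] at hs
    simp only [List.mem_flatMap, child, List.mem_map] at hs
    obtain ⟨t, ht, v, -, rfl⟩ := hs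
    simp [ih t ht]

lemma nonneg_mem_enum : ∀ (k : Nat) (s : List Int), s ∈ enum k → ∀ x ∈ s, 0 ≤ x := by
  intro k
  induction k with
  | zero => intro s hs; simp [enum, E] at hs; simp [hs]
  | succ k ih =>
    intro s hs
    rw [enum_succ] at hs
    simp only [List.mem_flatMap, child, List.mem_map] at hs
    obtain ⟨t, ht, v, hv, rfl⟩ := hs
    rw [PySem.List.mem_pyRange_one] at hv
    intro x hx
    rcases List.mem_append.1 hx with h | h
    · exact ih t ht x h
    · simp at h; omega

lemma mx_ge (s : List Int) : -1 ≤ mx s := (PySem.List.le_foldl_max s (-1)).1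

lemma mx_nil : mx [] = -1 := rfl

lemma child_head (s : List Int) : ∃ C, child s = (s ++ [0]) :: C := by
  have h0 : (0:Int) < mx s + 2 := by have := mx_ge s; omega
  rw [child, PySem.List.pyRange_one_cons h0]
  exact ⟨_, rfl⟩

lemma child_ne_nil (s : List Int) : child s ≠ [] := by
  obtain ⟨C, hC⟩ := child_head s; simp [hC]

lemma enum_head : ∀ (k : Nat), ∃ L, enum k = List.replicate k 0 :: L := by
  intro k
  induction k with
  | zero => exact ⟨[], rfl⟩
  | succ k ih =>
    obtain ⟨L, hL⟩ := ih
    obtain ⟨C, hC⟩ := child_head (List.replicate k 0)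
    refine ⟨C ++ L.flatMap child, ?_⟩
    rw [enum_succ, hL]
    simp [hC, List.replicate_succ']

lemma length_stopk (k : Nat) : (stopk k).length = k := by
  rw [stopk, PySem.List.length_pyRange_one]; omega

lemma stopk_succ (k : Nat) : stopk (k + 1) = stopk k ++ [(k : Int)] := by
  have : ((k:Int) + 1) = ((k+1 : Nat) : Int) := by push_cast; ring
  rw [stopk, stopk, ← this, PySem.List.pyRange_one_succ_right (by positivity)]

lemma mx_stopk (k : Nat) : mx (stopk k) = (k : Int) - 1 := by
  induction k with
  | zero => simp [mx, stopk, PySem.List.pyRange_one_eq_nil]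
  | succ k ih =>
    rw [stopk_succ, mx, List.foldl_append]
    rw [mx] at ih
    rw [ih]
    simp only [List.foldl_cons, List.foldl_nil]
    push_cast
    omega

lemma getLast?_flatMap {α β : Type} (f : α → List β) :
    ∀ (l : List α) (t : α), l.getLast? = some t → f t ≠ [] →
      (l.flatMap f).getLast? = (f t).getLast? := by
  intro l
  induction l with
  | nil => intro t h; simp at h
  | cons a l ih =>
    intro t h hne
    cases l with
    | nil =>
      simp at h; subst h
      simp [List.flatMap_cons]
    | cons b l' =>
      rw [List.getLast?_cons_cons] at h
      rw [List.flatMap_cons, List.getLast?_append_of_ne_nil, ih t h hne]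
      intro hnil
      have := ih t h hne
      rw [hnil] at this
      simp at this
      exact hne ((List.getLast?_eq_none_iff ..).mp this.symm ▸ rfl)

lemma enum_getLast : ∀ (k : Nat), (enum k).getLast? = some (stopk k) := by
  intro k
  induction k with
  | zero => rfl
  | succ k ih =>
    rw [enum_succ, getLast?_flatMap child (enum k) (stopk k) ih (child_ne_nil _)]
    rw [child, mx_stopk]
    have : (k:Int) - 1 + 2 = ((k:Int)) + 1 := by ring
    rw [this]
    have h2 : PySem.List.pyRange 0 ((k:Int)+1) 1 = PySem.List.pyRange 0 k 1 ++ [(k:Int)] := by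
      exact PySem.List.pyRange_one_succ_right (by positivity)
    rw [h2]
    simp [stopk_succ]

lemma pvListLt_irrefl : ∀ (s : List Int), pvListLt s s = false := by
  intro s
  induction s with
  | nil => rfl
  | cons a t ih => simp [pvListLt, ih]

lemma pvListLt_append : ∀ (t u : List Int), t.length = u.length → ∀ (a b : Int),
    pvListLt (t ++ [a]) (u ++ [b]) = (pvListLt t u || (decide (t = u) && decide (a < b))) := by
  intro t
  induction t with
  | nil =>
    intro u hu a b
    cases u with
    | nil => simp [pvListLt]
    | cons x xs => simp at hu
  | cons x xs ih =>
    intro u hu a b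
    cases u with
    | nil => simp at hu
    | cons y ys =>
      simp only [List.length_cons, Nat.add_right_cancel_iff] at hu
      simp only [List.cons_append, pvListLt]
      rcases lt_trichotomy x y with h | h | h
      · simp [h]
      · subst h
        simp only [lt_irrefl, if_false, ih ys hu a b]
        by_cases hxy : xs = ys <;> simp [hxy]
      · simp [h, not_lt.2 h.le]
        intro he
        exact absurd he (by omega)

lemma pvListLt_lt_append (t u : List Int) (h : t.length = u.length)
    (hlt : pvListLt t u = true) (a b : Int) : pvListLt (t ++ [a]) (u ++ [b]) = true := by
  simp [pvListLt_append t u h, hlt]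

lemma pvListLt_eq_append (t : List Int) (a b : Int) (hab : a < b) :
    pvListLt (t ++ [a]) (t ++ [b]) = true := by
  simp [pvListLt_append t t rfl, hab]

lemma allLe_enum : ∀ (k : Nat) (s : List Int), s ∈ enum k →
    s = stopk k ∨ pvListLt s (stopk k) = true := by
  intro k
  induction k with
  | zero =>
    intro s hs
    simp [enum, E] at hs
    left; simp [hs, stopk, PySem.List.pyRange_one_eq_nil]
  | succ k ih =>
    intro s hs
    rw [enum_succ] at hs
    simp only [List.mem_flatMap, child, List.mem_map] at hs
    obtain ⟨t, ht, v, hv, rfl⟩ := hs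
    rw [PySem.List.mem_pyRange_one] at hv
    have hlen : t.length = (stopk k).length := by
      rw [length_mem_enum k t ht, length_stopk]
    rw [stopk_succ, pvListLt_append t (stopk k) hlen v k]
    rcases ih t ht with h | h
    · subst h
      rw [mx_stopk] at hv
      by_cases hvk : v = (k:Int)
      · left; rw [hvk]
      · right; simp; omega
    · right; simp [h]

lemma mx_eq_foldl (x : Int) (xs : List Int) (hx : 0 ≤ x) : mx (x :: xs) = xs.foldl max x := by
  rw [mx, List.foldl_cons]
  congr 1
  omega

-- next_value on a decomposed nonempty list with nonnegative entries
lemma next_value_snoc (t : List Int) (v : Int) (ht : t ≠ []) (hnn : ∀ x ∈ t, 0 ≤ x) :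
    next_value (t ++ [v]) = if v = mx t + 1 then next_value t ++ [0] else t ++ [v + 1] := by
  rw [next_value]
  simp only [PySem.List.slice_to_neg_one, List.dropLast_concat,
    PySem.List.pyGet?_neg_one_append_singleton]
  rw [if_neg (by simp : ¬ (t ++ [v] = []))]
  obtain ⟨x, xs, rfl⟩ := List.exists_cons_of_ne_nil ht
  rw [PySem.List.max?_id_cons]
  simp only [Option.getD_some]
  have hmx : xs.foldl max x = mx (x :: xs) := (mx_eq_foldl x xs (hnn x (by simp))).symm
  rw [hmx]
  by_cases h : v = mx (x :: xs) + 1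
  · simp [h]
  · simp [h]

lemma isChain_flatMap {α β : Type} (R' : α → α → Prop) (R : β → β → Prop) (f : α → List β) :
    ∀ (M : List α), List.IsChain R' M →
      (∀ t ∈ M, f t ≠ []) →
      (∀ t ∈ M, List.IsChain R (f t)) →
      (∀ t t', t ∈ M → t' ∈ M → R' t t' →
        ∀ a ∈ (f t).getLast?, ∀ b ∈ (f t').head?, R a b) →
      List.IsChain R (M.flatMap f) := by
  intro M
  induction M with
  | nil => intro _ _ _ _; simp
  | cons t M' ih =>
    intro hch hne hblk hlink
    rw [List.flatMap_cons]
    refine List.IsChain.append (hblk t (by simp)) ?_ ?_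
    · refine ih (hch.suffix (List.suffix_cons t M')) (fun u hu => hne u (by simp [hu]))
        (fun u hu => hblk u (by simp [hu])) ?_
      intro u u' hu hu' hR a ha b hb
      exact hlink u u' (by simp [hu]) (by simp [hu']) hR a ha b hb
    · intro a ha b hb
      cases M' with
      | nil => simp at hb
      | cons t' M'' =>
        rw [List.flatMap_cons] at hb
        rw [List.head?_append_of_ne_nil _ (hne t' (by simp))] at hb
        have hR : R' t t' := by
          rw [List.isChain_cons_cons] at hch
          exact hch.1
        exact hlink t t' (by simp) (by simp) hR a ha b hb

-- pyRange is a +1 chain with bounds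
lemma isChain_pyRange (a b : Int) :
    List.IsChain (fun x y => y = x + 1 ∧ a ≤ x ∧ y < b) (PySem.List.pyRange a b 1) := by
  by_cases h : b ≤ a
  · rw [PySem.List.pyRange_one_eq_nil h]; exact .nil
  · push Not at h
    obtain ⟨n, hn⟩ : ∃ n : Nat, b - a = (n : Int) + 1 := ⟨(b - a - 1).toNat, by omega⟩
    clear h
    induction n generalizing a with
    | zero =>
      rw [PySem.List.pyRange_one_cons (by omega), PySem.List.pyRange_one_eq_nil (by omega)]
      exact .singleton _
    | succ n ihn =>
      rw [PySem.List.pyRange_one_cons (by omega), PySem.List.pyRange_one_cons (by omega)]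
      rw [List.isChain_cons_cons]
      constructor
      · exact ⟨rfl, le_refl a, by omega⟩
      · have := ihn (a + 1) (by omega)
        rw [PySem.List.pyRange_one_cons (by omega)] at this
        exact this.imp (by intro x y hxy; exact ⟨hxy.1, by omega, hxy.2.2⟩)

lemma chain_child (k : Nat) (t : List Int) (ht : t ∈ enum k) :
    List.IsChain (RelC (k + 1)) (child t) := by
  rw [child]
  apply List.isChain_map_of_isChain (S := RelC (k+1)) (fun v => t ++ [v])
    (l := PySem.List.pyRange 0 (mx t + 2) 1)
    (R := fun x y => y = x + 1 ∧ 0 ≤ x ∧ y < mx t + 2)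
  · intro a b hab
    obtain ⟨rfl, ha, hb⟩ := hab
    constructor
    · have htne : t ≠ [] := by
        intro h; subst h
        simp [mx] at hb; omega
      rw [next_value_snoc t a htne (nonneg_mem_enum k t ht)]
      rw [if_neg (by omega)]
    · rw [stopk_succ]
      rcases allLe_enum k t ht with h | h
      · subst h
        apply pvListLt_eq_append
        rw [mx_stopk] at hb; omega
      · exact pvListLt_lt_append t (stopk k) (by rw [length_mem_enum k t ht, length_stopk]) h _ _
  · exact isChain_pyRange 0 (mx t + 2)

lemma chain_enum : ∀ (k : Nat), List.IsChain (RelC k) (enum k) := by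
  intro k
  induction k with
  | zero => exact .singleton _
  | succ k ih =>
    rw [enum_succ]
    apply isChain_flatMap (RelC k) (RelC (k+1)) child (enum k) ih
      (fun t _ => child_ne_nil t) (fun t htm => chain_child k t htm)
    intro t t' htm htm' hR a ha b hb
    have hlast : (child t).getLast? = some (t ++ [mx t + 1]) := by
      rw [child]
      have : PySem.List.pyRange 0 (mx t + 2) 1
          = PySem.List.pyRange 0 (mx t + 1) 1 ++ [mx t + 1] := by
        have h1 : mx t + 2 = (mx t + 1) + 1 := by ring
        rw [h1]
        exact PySem.List.pyRange_one_succ_right (by have := mx_ge t; omega)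
      rw [this]
      simp
    have hhead : (child t').head? = some (t' ++ [0]) := by
      rw [child, PySem.List.pyRange_one_cons (by have := mx_ge t'; omega)]
      simp
    rw [hlast] at ha; rw [hhead] at hb
    simp only [Option.mem_some_iff] at ha hb
    subst ha; subst hb
    obtain ⟨hnv, hlt⟩ := hR
    have htne : t ≠ [] := by
      intro h
      have hk : k = 0 := by
        have := length_mem_enum k t htm; rw [h] at this; simpa using this.symm
      subst hk; subst h
      rw [show stopk 0 = [] from rfl] at hlt
      simp [pvListLt] at hlt
    constructor
    · rw [next_value_snoc t (mx t + 1) htne (nonneg_mem_enum k t htm), if_pos rfl, hnv]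
    · rw [stopk_succ]
      exact pvListLt_lt_append t (stopk k) (by rw [length_mem_enum k t htm, length_stopk]) hlt _ _

lemma length_flatMap_le {α β : Type} (f : α → List β) (c : Nat) :
    ∀ (l : List α), (∀ v ∈ l, (f v).length ≤ c) → (l.flatMap f).length ≤ l.length * c := by
  intro l
  induction l with
  | nil => intro _; simp
  | cons a l ih =>
    intro h
    rw [List.flatMap_cons, List.length_append, List.length_cons]
    have h1 := h a (by simp)
    have h2 := ih (fun v hv => h v (by simp [hv]))
    calc (f a).length + (l.flatMap f).length ≤ c + l.length * c := by omega
    _ = (l.length + 1) * c := by ring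

lemma length_E_le : ∀ (k : Nat) (m : Int), -1 ≤ m → (E k m).length ≤ ((m + 3).toNat + k) ^ k := by
  intro k
  induction k with
  | zero => intro m _; simp [E]
  | succ k ih =>
    intro m hm
    rw [E]
    have hb : ∀ v ∈ PySem.List.pyRange 0 (m + 2) 1,
        ((E k (max m v)).map (fun s => v :: s)).length ≤ ((m + 3).toNat + (k+1)) ^ k := by
      intro v hv
      rw [PySem.List.mem_pyRange_one] at hv
      rw [List.length_map]
      calc (E k (max m v)).length ≤ ((max m v + 3).toNat + k) ^ k := ih (max m v) (by omega)
      _ ≤ ((m + 3).toNat + (k+1)) ^ k := by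
          apply Nat.pow_le_pow_left
          have : max m v ≤ m + 1 := by omega
          omega
    calc ((PySem.List.pyRange 0 (m+2) 1).flatMap _).length
        ≤ (PySem.List.pyRange 0 (m+2) 1).length * ((m + 3).toNat + (k+1)) ^ k :=
          length_flatMap_le _ _ _ hb
    _ ≤ ((m + 3).toNat + (k+1)) * ((m + 3).toNat + (k+1)) ^ k := by
        apply Nat.mul_le_mul_right
        rw [PySem.List.length_pyRange_one]
        omega
    _ = ((m + 3).toNat + (k+1)) ^ (k+1) := by ring

lemma condLt (k : Nat) (t : List Int) (ht : t ∈ enum k) (v : Int)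
    (h : pvListLt t (stopk k) = true ∨ (t = stopk k ∧ v < (k : Int))) :
    pvListLt (t ++ [v]) (stopk (k + 1)) = true := by
  rw [stopk_succ]
  rcases h with h | ⟨rfl, hv⟩
  · exact pvListLt_lt_append t (stopk k) (by rw [length_mem_enum k t ht, length_stopk]) h _ _
  · exact pvListLt_eq_append _ _ _ hv

-- the central lemma: A's loop, started at t ++ [v] for a suffix t :: T of enum k, produces the
-- remaining children of t followed by all children blocks of the remaining prefixes T
lemma loopA_outer (k : Nat) :
    ∀ (T : List (List Int)) (t : List Int), (t :: T) <:+ enum k →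
      ∀ (j : Nat), (j : Int) ≤ mx t + 1 →
        ∀ (fuel : Nat), j + 1 + (T.flatMap child).length ≤ fuel →
          loopA (stopk (k + 1)) (t ++ [mx t + 1 - (j : Int)]) fuel =
            (PySem.List.pyRange (mx t + 1 - (j : Int)) (mx t + 2) 1).map (fun v => t ++ [v])
              ++ T.flatMap child := by
  intro T
  induction T with
  | nil =>
    intro t hsuf j
    have htm : t ∈ enum k := hsuf.subset (by simp)
    have ht : t = stopk k := by
      obtain ⟨p, hp⟩ := hsuf
      have h := enum_getLast k
      rw [← hp, List.getLast?_concat] at h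
      exact Option.some_inj.mp h
    subst ht
    induction j with
    | zero =>
      intro hj fuel hfuel
      obtain ⟨f, rfl⟩ : ∃ f, fuel = f + 1 := ⟨fuel - 1, by omega⟩
      have hv : mx (stopk k) + 1 - ((0:Nat):Int) = (k:Int) := by rw [mx_stopk]; push_cast; ring
      rw [hv]
      have hs : stopk k ++ [(k:Int)] = stopk (k+1) := (stopk_succ k).symm
      rw [loopA, hs, pvListLt_irrefl, if_neg (by simp)]
      have h2 : mx (stopk k) + 2 = (k:Int) + 1 := by rw [mx_stopk]; ring
      rw [h2, PySem.List.pyRange_one_singleton]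
      simp [hs]
    | succ j ihj =>
      intro hj fuel hfuel
      obtain ⟨f, rfl⟩ : ∃ f, fuel = f + 1 := ⟨fuel - 1, by omega⟩
      push_cast
      have hjc : ((j:Int)) + 1 ≤ mx (stopk k) + 1 := by push_cast at hj; omega
      have hvk : mx (stopk k) + 1 - ((j:Int) + 1) < (k:Int) := by rw [mx_stopk]; omega
      have htne : stopk k ≠ [] := by
        intro h
        rw [h, mx_nil] at hjc
        omega
      have hinc : next_value (stopk k ++ [mx (stopk k) + 1 - ((j:Int) + 1)])
          = stopk k ++ [mx (stopk k) + 1 - ((j:Int) + 1) + 1] := by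
        rw [next_value_snoc (stopk k) _ htne (nonneg_mem_enum k _ htm), if_neg (by omega)]
      rw [loopA, if_pos (condLt k (stopk k) htm _ (Or.inr ⟨rfl, hvk⟩)), hinc]
      have hstep : mx (stopk k) + 1 - ((j:Int) + 1) + 1 = mx (stopk k) + 1 - (j:Int) := by ring
      rw [hstep, ihj (by omega) f (by simp at hfuel ⊢; omega)]
      rw [show PySem.List.pyRange (mx (stopk k) + 1 - ((j:Int) + 1)) (mx (stopk k) + 2) 1
            = (mx (stopk k) + 1 - ((j:Int) + 1)) ::
              PySem.List.pyRange (mx (stopk k) + 1 - ((j:Int) + 1) + 1) (mx (stopk k) + 2) 1 from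
          PySem.List.pyRange_one_cons (by omega)]
      rw [hstep]
      simp
  | cons t' T' ihT =>
    intro t hsuf j
    have htm : t ∈ enum k := hsuf.subset (by simp)
    have hsuf' : (t' :: T') <:+ enum k := by
      obtain ⟨p, hp⟩ := hsuf
      exact ⟨p ++ [t], by simpa using hp⟩
    have hrel : RelC k t t' := by
      have hch := (chain_enum k).suffix hsuf
      rw [List.isChain_cons_cons] at hch
      exact hch.1
    obtain ⟨hnv, hlt⟩ := hrel
    have htne : t ≠ [] := by
      intro h
      have hk : k = 0 := by
        have := length_mem_enum k t htm; rw [h] at this; simpa using this.symm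
      subst hk; subst h
      rw [show stopk 0 = [] from rfl] at hlt
      simp [pvListLt] at hlt
    induction j with
    | zero =>
      intro hj fuel hfuel
      obtain ⟨f, rfl⟩ : ∃ f, fuel = f + 1 := ⟨fuel - 1, by omega⟩
      have hv : mx t + 1 - ((0:Nat):Int) = mx t + 1 := by push_cast; ring
      rw [hv]
      have hcarry : next_value (t ++ [mx t + 1]) = t' ++ [0] := by
        rw [next_value_snoc t (mx t + 1) htne (nonneg_mem_enum k t htm), if_pos rfl, hnv]
      rw [loopA, if_pos (condLt k t htm (mx t + 1) (Or.inl hlt)), hcarry]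
      have hmx' := mx_ge t'
      have hfuel' : (mx t' + 1).toNat + 1 + (T'.flatMap child).length ≤ f := by
        have hlen : (child t').length = (mx t' + 1).toNat + 1 := by
          rw [child, List.length_map, PySem.List.length_pyRange_one]
          omega
        simp only [List.flatMap_cons, List.length_append] at hfuel
        omega
      have hIH := ihT t' hsuf' (mx t' + 1).toNat (by omega) f hfuel'
      rw [show ((((mx t' + 1).toNat) : Nat) : Int) = mx t' + 1 from by omega] at hIH
      rw [show mx t' + 1 - (mx t' + 1) = (0:Int) from by ring] at hIH
      rw [hIH]
      rw [show PySem.List.pyRange (mx t + 1) (mx t + 2) 1 = [mx t + 1] from by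
        rw [show mx t + 2 = (mx t + 1) + 1 from by ring, PySem.List.pyRange_one_singleton]]
      simp [child]
    | succ j ihj =>
      intro hj fuel hfuel
      obtain ⟨f, rfl⟩ : ∃ f, fuel = f + 1 := ⟨fuel - 1, by omega⟩
      push_cast
      have hjc : ((j:Int)) + 1 ≤ mx t + 1 := by push_cast at hj; omega
      have hvlt : mx t + 1 - ((j:Int) + 1) < mx t + 1 := by omega
      have hcond : pvListLt (t ++ [mx t + 1 - ((j:Int) + 1)]) (stopk (k + 1)) = true := by
        apply condLt k t htm _
        rcases allLe_enum k t htm with h | h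
        · right
          refine ⟨h, ?_⟩
          rw [h, mx_stopk]
          omega
        · left; exact h
      have hinc : next_value (t ++ [mx t + 1 - ((j:Int) + 1)])
          = t ++ [mx t + 1 - ((j:Int) + 1) + 1] := by
        rw [next_value_snoc t _ htne (nonneg_mem_enum k t htm), if_neg (by omega)]
      rw [loopA, if_pos hcond, hinc]
      have hstep : mx t + 1 - ((j:Int) + 1) + 1 = mx t + 1 - (j:Int) := by ring
      rw [hstep, ihj (by omega) f (by have h2f := hfuel; omega)]
      rw [show PySem.List.pyRange (mx t + 1 - ((j:Int) + 1)) (mx t + 2) 1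
            = (mx t + 1 - ((j:Int) + 1)) ::
              PySem.List.pyRange (mx t + 1 - ((j:Int) + 1) + 1) (mx t + 2) 1 from
          PySem.List.pyRange_one_cons (by omega)]
      rw [hstep]
      simp

lemma loopA_enum (k : Nat) : ∀ (fuel : Nat), (enum k).length ≤ fuel →
    loopA (stopk k) (List.replicate k 0) fuel = enum k := by
  cases k with
  | zero =>
    intro fuel hfuel
    have : (enum 0).length = 1 := rfl
    obtain ⟨f, rfl⟩ : ∃ f, fuel = f + 1 := ⟨fuel - 1, by omega⟩
    rw [loopA]
    rfl
  | succ k =>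
    intro fuel hfuel
    obtain ⟨L, hL⟩ := enum_head k
    have hmx := mx_ge (List.replicate k 0)
    have hsuf : (List.replicate k 0 :: L) <:+ enum k := ⟨[], by simp [hL]⟩
    have hlen : (child (List.replicate k 0)).length = (mx (List.replicate k 0) + 2).toNat := by
      rw [child, List.length_map, PySem.List.length_pyRange_one]
      congr 1
      omega
    have hfl : (enum (k+1)).length
        = (child (List.replicate k 0)).length + (L.flatMap child).length := by
      rw [enum_succ, hL, List.flatMap_cons, List.length_append]
    have hIH := loopA_outer k L (List.replicate k 0) hsuf
      (mx (List.replicate k 0) + 1).toNat (by omega) fuel (by omega)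
    rw [show (((mx (List.replicate k 0) + 1).toNat : Nat) : Int)
          = mx (List.replicate k 0) + 1 from by omega] at hIH
    rw [show mx (List.replicate k 0) + 1 - (mx (List.replicate k 0) + 1) = (0:Int) from by ring]
      at hIH
    rw [show (List.replicate (k+1) (0:Int)) = List.replicate k 0 ++ [0] from by
        rw [List.replicate_succ']]
    rw [hIH, enum_succ, hL, List.flatMap_cons]
    rfl

-- ===== VERDICT (by name: the statement is the Claim_ definition above) =====
theorem rhyme_schemes_spec : Claim_equal_rhyme_schemes := by
  intro n _
  unfold Spec_rhyme_schemes
  rw [rhyme_schemes_alt, gen_helper_E n.toNat n rfl [] (-1)]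
  have halt : (E n.toNat (-1)).map (fun s => [] ++ s) = enum n.toNat := by
    simp [enum]
  rw [halt]
  have hstop : PySem.List.pyRange 0 n 1 = stopk n.toNat := by
    rcases le_or_gt 0 n with h | h
    · rw [stopk, show ((n.toNat : Nat) : Int) = n from by omega]
    · rw [stopk, PySem.List.pyRange_one_eq_nil (by omega),
        PySem.List.pyRange_one_eq_nil (by omega)]
  have hstart : (PySem.List.pyRange 0 n 1).map (fun _ => (0:Int)) = List.replicate n.toNat 0 := by
    rw [List.map_const', PySem.List.length_pyRange_one]
    congr 1
    omega
  rw [rhyme_schemes, hstart, hstop]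
  apply loopA_enum
  calc (enum n.toNat).length ≤ (((-1:Int) + 3).toNat + n.toNat) ^ n.toNat :=
        length_E_le n.toNat (-1) (by omega)
  _ = (n.toNat + 2) ^ n.toNat := by congr 1; omega
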